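-- pv_equiv track=rewrite | github.com/xtknight/rich-morphological-tagger | ud_converter/simple_ngram_oracle.py | varlen_oracle
-- ===== SOURCE A (Python) =====
-- def varlen_oracle(L1, L2):
-- 	O = []
-- 	for i in range(max(len(L1), len(L2))):
-- 		if len(L1) > i:
-- 			if len(L2) > i:
-- 				if L1[i] == L2[i]:
-- 					O.append('KEEP')
-- 				else:
-- 					O.append('MOD:' + L2[i])
-- 			else:
-- 				# ignore this part of L1
-- 				O.append('NOOP')
-- 		else:
-- 			# now we have a problem. append all mods to last element of L1??
-- 			# or leave a buffer??
-- 			if len(L2) > i: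
-- 				# this almost NEVER happens unless somehow the LEMMA is longer
-- 				# than the FORM
-- 				# we can leave some buffer in case??
-- 				O.append('MOD:' + L2[i]) # means ADD:
-- 			else:
-- 				# this shouldn't happen
-- 				assert None, 'i not in L1 or L2???'
--
-- 	return O
-- ===== SOURCE B (Python) =====
-- def varlen_oracle(L1, L2):
--     # explicit stack machine: consume both sequences by popping, no indices or lengths
--     s1 = L1[::-1]
--     s2 = L2[::-1]
--     out = []
--     while s1 or s2:
--         if not s2:
--             s1.pop()
--             out.append('NOOP')
--         elif not s1:
--             out.append('MOD:' + s2.pop())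
--         else:
--             a = s1.pop()
--             b = s2.pop()
--             out.append('KEEP' if a == b else 'MOD:' + b)
--     return out
-- ===== Notes on version B (the rewrite author's own statement) =====
-- stated objective: alternative
-- what changed: Replaces A's index loop over range(max(len(L1),len(L2))) with nested length-vs-index guards by an explicit stack machine: both lists are reversed into stacks that are destructively consumed by popping, branching only on stack emptiness, with no indices, no length arithmetic and no unreachable assert.
import Mathlib
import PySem

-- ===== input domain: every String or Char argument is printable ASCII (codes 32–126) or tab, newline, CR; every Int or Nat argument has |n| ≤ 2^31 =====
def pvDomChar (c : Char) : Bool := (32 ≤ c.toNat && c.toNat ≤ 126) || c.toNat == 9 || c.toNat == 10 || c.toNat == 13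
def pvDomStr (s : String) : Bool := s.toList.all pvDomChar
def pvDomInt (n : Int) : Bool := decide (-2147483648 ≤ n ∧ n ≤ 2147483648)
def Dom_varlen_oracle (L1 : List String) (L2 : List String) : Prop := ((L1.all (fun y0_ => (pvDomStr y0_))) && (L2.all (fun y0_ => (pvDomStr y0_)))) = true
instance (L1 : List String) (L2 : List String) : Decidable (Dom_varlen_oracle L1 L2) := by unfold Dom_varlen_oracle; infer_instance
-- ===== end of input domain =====

-- B replaces A's index loop over range(max(len,len)) with nested length guards by an
-- explicit stack machine (both lists reversed into stacks, consumed by popping,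
-- branching only on emptiness); objective: alternative decomposition.

-- ===== PORT A =====
-- Literal port of A: one loop over range(max(len(L1),len(L2))), appending per the
-- nested branches. The final 'assert None' branch is unreachable (i < max of the
-- lengths always lands in an earlier branch); the port leaves O unchanged there.
def varlen_oracle (L1 : List String) (L2 : List String) : List String :=
  (List.range (max L1.length L2.length)).foldl
    (fun O i =>
      if L1.length > i then
        if L2.length > i then
          if L1.getD i "" = L2.getD i "" then O ++ ["KEEP"]
          else O ++ ["MOD:" ++ L2.getD i ""]
        else O ++ ["NOOP"]
      else
        if L2.length > i then O ++ ["MOD:" ++ L2.getD i ""]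
        else O)  -- unreachable assert branch
    []

-- ===== PORT B =====
-- The while loop of Source B: two stacks whose top is the LAST list element (as in
-- Python's list.pop()), consumed until both are empty.
def pvAltLoop : List String → List String → List String → List String
  | [], [], out => out
  | x :: t, [], out =>
      pvAltLoop (x :: t).dropLast [] (out ++ ["NOOP"])
  | [], y :: u, out =>
      pvAltLoop [] (y :: u).dropLast (out ++ ["MOD:" ++ (y :: u).getLastD ""])
  | x :: t, y :: u, out =>
      pvAltLoop (x :: t).dropLast (y :: u).dropLast
        (out ++ [if (x :: t).getLastD "" = (y :: u).getLastD "" then "KEEP"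
                 else "MOD:" ++ (y :: u).getLastD ""])
  termination_by s1 s2 _ => s1.length + s2.length
  decreasing_by all_goals (simp [List.length_dropLast]; try omega)

def varlen_oracle_alt (L1 : List String) (L2 : List String) : List String :=
  pvAltLoop L1.reverse L2.reverse []

-- ===== PRECONDITION & SPEC =====
def Spec_varlen_oracle (L1 : List String) (L2 : List String) (out : List String) : Prop := out = varlen_oracle_alt L1 L2
instance (L1 : List String) (L2 : List String) (out : List String) : Decidable (Spec_varlen_oracle L1 L2 out) := by unfold Spec_varlen_oracle; infer_instance

-- ===== CLAIM =====
def Claim_equal_varlen_oracle : Prop := ∀ (L1 : List String) (L2 : List String), Dom_varlen_oracle L1 L2 → Spec_varlen_oracle L1 L2 (varlen_oracle L1 L2)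

-- ===== LEMMAS AND PROOFS =====

-- per-index value A's loop appends at index i (for i < max of the lengths)
def pvG (L1 L2 : List String) (i : Nat) : String :=
  if i < L1.length then
    if i < L2.length then
      (if L1.getD i "" = L2.getD i "" then "KEEP" else "MOD:" ++ L2.getD i "")
    else "NOOP"
  else "MOD:" ++ L2.getD i ""

theorem pv_foldl_map (L1 L2 : List String) (l : List Nat)
    (h : ∀ i ∈ l, i < max L1.length L2.length) (acc : List String) :
    l.foldl
      (fun O i =>
        if L1.length > i then
          if L2.length > i then
            if L1.getD i "" = L2.getD i "" then O ++ ["KEEP"]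
            else O ++ ["MOD:" ++ L2.getD i ""]
          else O ++ ["NOOP"]
        else
          if L2.length > i then O ++ ["MOD:" ++ L2.getD i ""]
          else O) acc
    = acc ++ l.map (pvG L1 L2) := by
  induction l generalizing acc with
  | nil => simp
  | cons a t ih =>
    have ha : a < max L1.length L2.length := h a (List.mem_cons_self ..)
    have step : (if L1.length > a then
          if L2.length > a then
            if L1.getD a "" = L2.getD a "" then acc ++ ["KEEP"]
            else acc ++ ["MOD:" ++ L2.getD a ""]
          else acc ++ ["NOOP"]
        else
          if L2.length > a then acc ++ ["MOD:" ++ L2.getD a ""]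
          else acc) = acc ++ [pvG L1 L2 a] := by
      unfold pvG
      by_cases h1 : a < L1.length
      · by_cases h2 : a < L2.length
        · simp only [gt_iff_lt, h1, h2, if_true]
          split <;> simp
        · simp [h1, h2]
      · by_cases h2 : a < L2.length
        · simp [h1, h2]
        · exact absurd ha (by omega)
    simp only [List.foldl_cons, List.map_cons, step,
      ih (fun i hi => h i (List.mem_cons_of_mem _ hi))]
    simp

theorem pv_A_eq_map (L1 L2 : List String) :
    varlen_oracle L1 L2 = (List.range (max L1.length L2.length)).map (pvG L1 L2) := by
  unfold varlen_oracle
  simpa using pv_foldl_map L1 L2 _ (fun i hi => List.mem_range.mp hi) []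

-- structural-recursion description of B, used as the bridge between the stack
-- machine and the per-index map
def pvRec : List String → List String → List String
  | [], [] => []
  | _ :: t1, [] => "NOOP" :: pvRec t1 []
  | [], b :: t2 => ("MOD:" ++ b) :: pvRec [] t2
  | a :: t1, b :: t2 =>
      (if a = b then "KEEP" else "MOD:" ++ b) :: pvRec t1 t2

theorem pv_dropLast_cons_snoc {α : Type} (x : α) (t : List α) (a : α) :
    (x :: (t ++ [a])).dropLast = x :: t := by
  simpa using List.dropLast_concat (l₁ := x :: t) (b := a)

theorem pv_getLast?_cons_snoc (x : String) (t : List String) (a : String) :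
    (x :: (t ++ [a])).getLast? = some a := by
  rw [← List.cons_append, List.getLast?_concat]

theorem pvAltLoop_snoc_nil (l : List String) (a : String) (out : List String) :
    pvAltLoop (l ++ [a]) [] out = pvAltLoop l [] (out ++ ["NOOP"]) := by
  cases l <;> simp [pvAltLoop, pv_dropLast_cons_snoc]

theorem pvAltLoop_nil_snoc (m : List String) (b : String) (out : List String) :
    pvAltLoop [] (m ++ [b]) out = pvAltLoop [] m (out ++ ["MOD:" ++ b]) := by
  cases m <;> simp [pvAltLoop, pv_dropLast_cons_snoc, pv_getLast?_cons_snoc]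

theorem pvAltLoop_snoc_snoc (l m : List String) (a b : String) (out : List String) :
    pvAltLoop (l ++ [a]) (m ++ [b]) out
      = pvAltLoop l m (out ++ [if a = b then "KEEP" else "MOD:" ++ b]) := by
  cases l <;> cases m <;>
    simp [pvAltLoop, pv_dropLast_cons_snoc, pv_getLast?_cons_snoc]

theorem pvAltLoop_eq_rec (r1 r2 : List String) :
    ∀ out, pvAltLoop r1.reverse r2.reverse out = out ++ pvRec r1 r2 := by
  induction r1, r2 using pvRec.induct with
  | case1 => intro out; simp [pvAltLoop, pvRec]
  | case2 a t1 ih =>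
    intro out
    simp only [List.reverse_cons, List.reverse_nil] at *
    rw [pvAltLoop_snoc_nil, ih]
    simp [pvRec]
  | case3 b t2 ih =>
    intro out
    simp only [List.reverse_cons, List.reverse_nil] at *
    rw [pvAltLoop_nil_snoc, ih]
    simp [pvRec]
  | case4 a t1 b t2 ih =>
    intro out
    simp only [List.reverse_cons] at *
    rw [pvAltLoop_snoc_snoc, ih]
    simp [pvRec]

theorem pv_rec_eq_map (L1 L2 : List String) :
    pvRec L1 L2 = (List.range (max L1.length L2.length)).map (pvG L1 L2) := by
  induction L1, L2 using pvRec.induct with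
  | case1 => simp [pvRec]
  | case2 a t1 ih =>
    rw [pvRec, ih]
    simp only [List.length_cons, List.length_nil, Nat.max_eq_left (Nat.zero_le _),
      List.range_succ_eq_map, List.map_cons, List.map_map]
    congr 1 <;> simp [pvG]
  | case3 b t2 ih =>
    rw [pvRec, ih]
    simp only [List.length_cons, List.length_nil, Nat.max_eq_right (Nat.zero_le _),
      List.range_succ_eq_map, List.map_cons, List.map_map]
    congr 1
  | case4 a t1 b t2 ih =>
    rw [pvRec, ih]
    have hmax : max (a :: t1).length (b :: t2).length = (max t1.length t2.length) + 1 := by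
      simp [Nat.succ_max_succ]
    rw [hmax, List.range_succ_eq_map, List.map_cons, List.map_map]
    congr 1 <;> simp [pvG]

-- ===== VERDICT =====
theorem varlen_oracle_spec : Claim_equal_varlen_oracle := by
  intro L1 L2 _
  unfold Spec_varlen_oracle varlen_oracle_alt
  rw [pv_A_eq_map, pvAltLoop_eq_rec, pv_rec_eq_map]
  simp
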